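-- pv_equiv track=rewrite | github.com/keplr-io/picard | picard/parser/optional.py | get_possible_lists
-- ===== SOURCE A (Python) =====
-- def get_possible_lists(ls, head=0):
--     if head >= len(ls):
--         return [ls]
--
--     if not is_optional(ls[head]):
--         return get_possible_lists(ls, head + 1)
--
--     rmls = ls[:head] + ls[head + 1:]
--     return get_possible_lists(
--         ls, head + 1
--     ) + get_possible_lists(
--         rmls, head
--     )
--
-- def is_optional(item):
--     return isinstance(item, dict) and '#optional' in item
-- ===== SOURCE B (Python) =====
-- def get_possible_lists(ls, head=0):
--     pre, rest = ls[:head], ls[head:]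
--     tails = [[]]
--     for item in reversed(rest):
--         if is_optional(item):
--             tails = [[item] + t for t in tails] + tails
--         else:
--             tails = [[item] + t for t in tails]
--     return [pre + t for t in tails]
--
-- def is_optional(item):
--     return isinstance(item, dict) and '#optional' in item
-- ===== Notes on version B (the rewrite author's own statement) =====
-- stated objective: simpler
-- what changed: A's double recursion on (ls, head) that repeatedly rebuilds sliced copies (rmls) is replaced by a single right-to-left pass over ls[head:] that folds each item into an accumulated list of variant tails, then prefixes ls[:head].
-- outside the precondition, e.g. on get_possible_lists([{'x': 'y'}], -1): A returns [[{'x': 'y'}]], B returns [[{'x': 'y'}]]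
import Mathlib
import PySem

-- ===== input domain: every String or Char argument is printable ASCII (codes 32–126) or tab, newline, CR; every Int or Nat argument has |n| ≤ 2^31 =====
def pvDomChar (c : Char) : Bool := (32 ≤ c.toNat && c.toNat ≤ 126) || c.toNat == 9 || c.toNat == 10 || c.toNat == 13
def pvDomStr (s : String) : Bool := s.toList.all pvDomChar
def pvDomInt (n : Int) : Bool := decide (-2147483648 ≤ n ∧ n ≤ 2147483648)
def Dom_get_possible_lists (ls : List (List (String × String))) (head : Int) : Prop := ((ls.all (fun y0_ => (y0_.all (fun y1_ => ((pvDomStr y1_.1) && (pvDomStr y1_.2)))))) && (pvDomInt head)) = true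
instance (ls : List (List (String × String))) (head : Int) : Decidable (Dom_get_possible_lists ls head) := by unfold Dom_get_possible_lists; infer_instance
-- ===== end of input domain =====

-- B replaces A's double recursion with index surgery by a single right-to-left pass that
-- folds the suffix into the list of variant tails (objective: simpler; same output order).

-- ===== PORT A =====
-- is_optional(item): item is a dict in every call here, so it is '#optional' in item (key membership)
def pvIsOptional (item : List (String × String)) : Bool := item.any (fun p => p.1 == "#optional")

-- recursion of A over a Nat head (within Pre_ 0 ≤ head, Python's head is always a Nat here;
-- ls[h] is in range since h < len in that branch, so getD is exact; rmls = ls[:h] + ls[h+1:])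
def pvGoA (ls : List (List (String × String))) (h : Nat) : List (List (List (String × String))) :=
  if ls.length ≤ h then [ls]
  else if ¬ pvIsOptional (ls.getD h []) then pvGoA ls (h + 1)
  else
    let rmls := ls.take h ++ ls.drop (h + 1)
    pvGoA ls (h + 1) ++ pvGoA rmls h
termination_by 2 * ls.length - h
decreasing_by
  · omega
  · omega
  · simp only [List.length_append, List.length_take, List.length_drop]; omega

def get_possible_lists (ls : List (List (String × String))) (head : Int) : List (List (List (String × String))) :=
  pvGoA ls head.toNat

-- ===== PORT B =====
-- step of the 'for item in reversed(rest)' loop, updating the accumulator 'tails'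
def pvStep (item : List (String × String)) (tails : List (List (List (String × String)))) : List (List (List (String × String))) :=
  if pvIsOptional item then tails.map (fun t => item :: t) ++ tails
  else tails.map (fun t => item :: t)

def get_possible_lists_alt (ls : List (List (String × String))) (head : Int) : List (List (List (String × String))) :=
  let pre := PySem.List.slice ls none (some head)
  let rest := PySem.List.slice ls (some head) none
  let tails := rest.reverse.foldl (fun tails item => pvStep item tails) [[]]
  tails.map (fun t => pre ++ t)

-- ===== PRECONDITION & SPEC =====
-- Pre_ excludes negative head, where Python A indexes ls[head] with wraparound: there A raises
-- (IndexError, or unbounded recursion on an optional item) or returns only by that accidental wraparound.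
def Pre_get_possible_lists (ls : List (List (String × String))) (head : Int) : Prop := 0 ≤ head
instance (ls : List (List (String × String))) (head : Int) : Decidable (Pre_get_possible_lists ls head) := by unfold Pre_get_possible_lists; infer_instance

def pvWitness_get_possible_lists : (List (List (String × String))) × Int :=
  ([[("#optional", "1")], [("k", "v")]], 0)

def Spec_get_possible_lists (ls : List (List (String × String))) (head : Int) (out : List (List (List (String × String)))) : Prop := out = get_possible_lists_alt ls head
instance (ls : List (List (String × String))) (head : Int) (out : List (List (List (String × String)))) : Decidable (Spec_get_possible_lists ls head out) := by unfold Spec_get_possible_lists; infer_instance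

-- ===== CLAIM (what is proved, stated in full; the proofs are below) =====
def Claim_equal_get_possible_lists : Prop := ∀ (ls : List (List (String × String))) (head : Int), Dom_get_possible_lists ls head → Pre_get_possible_lists ls head → Spec_get_possible_lists ls head (get_possible_lists ls head)

-- ===== LEMMAS AND PROOFS =====

-- the folded tails of the suffix, as a foldr (B's loop runs over reversed(rest))
def pvVariants (xs : List (List (String × String))) : List (List (List (String × String))) :=
  xs.foldr pvStep [[]]

theorem pvGoA_eq_variants (n : Nat) (ls : List (List (String × String))) (h : Nat)
    (hn : 2 * ls.length - h ≤ n) :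
    pvGoA ls h = (pvVariants (ls.drop h)).map (fun t => ls.take h ++ t) := by
  induction n generalizing ls h with
  | zero =>
    have hlen : ls.length ≤ h := by omega
    rw [pvGoA]
    simp [hlen, List.drop_eq_nil_of_le hlen, pvVariants, List.take_of_length_le hlen]
  | succ n ih =>
    by_cases hlen : ls.length ≤ h
    · rw [pvGoA]
      simp [hlen, List.drop_eq_nil_of_le hlen, pvVariants, List.take_of_length_le hlen]
    · have hlt : h < ls.length := by omega
      have hdrop : ls.drop h = ls[h] :: ls.drop (h + 1) := List.drop_eq_getElem_cons hlt
      have htake : ls.take (h + 1) = ls.take h ++ [ls[h]] := by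
        rw [List.take_succ]; simp [hlt]
      have hget : ls.getD h [] = ls[h] := List.getD_eq_getElem ls [] hlt
      by_cases hopt : pvIsOptional ls[h]
      · -- optional head: A appends the keep-branch and the drop-branch
        rw [pvGoA]
        simp only [hlen, if_false, hget, hopt, not_true_eq_false, if_false]
        have ih1 : pvGoA ls (h + 1)
            = (pvVariants (ls.drop (h + 1))).map (fun t => ls.take (h + 1) ++ t) :=
          ih ls (h + 1) (by omega)
        have hrm : (ls.take h ++ ls.drop (h + 1)).length = ls.length - 1 := by
          simp [List.length_take, List.length_drop]; omega
        have ih2 : pvGoA (ls.take h ++ ls.drop (h + 1)) h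
            = (pvVariants ((ls.take h ++ ls.drop (h + 1)).drop h)).map
                (fun t => (ls.take h ++ ls.drop (h + 1)).take h ++ t) :=
          ih (ls.take h ++ ls.drop (h + 1)) h (by rw [hrm]; omega)
        have hlt' : h ≤ (ls.take h).length := by simp [List.length_take]; omega
        have hdrop' : (ls.take h ++ ls.drop (h + 1)).drop h = ls.drop (h + 1) := by
          rw [List.drop_append_of_le_length hlt']
          simp [List.length_take, Nat.min_eq_left (le_of_lt hlt)]
        have htake' : (ls.take h ++ ls.drop (h + 1)).take h = ls.take h := by
          rw [List.take_append_of_le_length hlt']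
          simp [List.take_take]
        rw [ih1, ih2, hdrop', htake', hdrop]
        have hv : pvVariants (ls[h] :: ls.drop (h + 1))
            = (pvVariants (ls.drop (h + 1))).map (fun t => ls[h] :: t)
              ++ pvVariants (ls.drop (h + 1)) := by
          unfold pvVariants; rw [List.foldr_cons]; unfold pvStep; rw [if_pos hopt]
        rw [hv, List.map_append, List.map_map, htake]
        congr 1
        exact List.map_congr_left (fun a _ => by rw [List.append_assoc]; rfl)
      · -- non-optional head: A recurses on head+1
        rw [pvGoA]
        simp only [hlen, if_false, hget, hopt, not_false_eq_true, if_true]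
        have ih1 : pvGoA ls (h + 1)
            = (pvVariants (ls.drop (h + 1))).map (fun t => ls.take (h + 1) ++ t) :=
          ih ls (h + 1) (by omega)
        rw [ih1, hdrop]
        have hv : pvVariants (ls[h] :: ls.drop (h + 1))
            = (pvVariants (ls.drop (h + 1))).map (fun t => ls[h] :: t) := by
          unfold pvVariants; rw [List.foldr_cons]; unfold pvStep; rw [if_neg hopt]
        rw [hv, List.map_map, htake]
        exact List.map_congr_left (fun a _ => by rw [List.append_assoc]; rfl)

-- ===== VERDICT (by name: the statement is the Claim_ definition above) =====
theorem get_possible_lists_spec : Claim_equal_get_possible_lists := by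
  intro ls head _hdom hpre
  unfold Spec_get_possible_lists get_possible_lists get_possible_lists_alt
  have h0 : 0 ≤ head := hpre
  obtain ⟨h, rfl⟩ : ∃ h : Nat, head = (h : Int) := ⟨head.toNat, (Int.toNat_of_nonneg h0).symm⟩
  simp only [Int.toNat_natCast, PySem.List.slice_to_natCast, PySem.List.slice_from_natCast]
  rw [pvGoA_eq_variants (2 * ls.length) ls h (by omega)]
  rw [List.foldl_reverse]
  rfl
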